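-- pv_equiv track=rewrite | github.com/mailund/pystr | pystr/skew_common.py | less
-- ===== SOURCE A (Python) =====
-- import typing
--
-- SENTINEL = 0
--
-- def safe_idx(x: typing.Sequence[int], i: int) -> int:
--     "Hack to get zero if we index beyond the end."
--     return SENTINEL if i >= len(x) else x[i]
--
-- def less(x: typing.Sequence[int], i: int, j: int, ISA: dict[int, int]) -> bool:
--     "Check if x[i:] < x[j:] using the inverse suffix array for SA12."
--     a, b = safe_idx(x, i), safe_idx(x, j)
--     if a < b:
--         return True
--     if a > b:
--         return False
--     if i % 3 != 0 and j % 3 != 0: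
--         return ISA[i] < ISA[j]
--     return less(x, i + 1, j + 1, ISA)
-- ===== SOURCE B (Python) =====
-- SENTINEL = 0
--
--
-- def safe_idx(x, i):
--     "Hack to get zero if we index beyond the end."
--     return SENTINEL if i >= len(x) else x[i]
--
--
-- def less(x, i, j, ISA):
--     "Check if x[i:] < x[j:] using the inverse suffix array for SA12."
--     # How many positions to advance before both i+d and j+d are sample
--     # positions (not divisible by 3): a closed form over the residues.
--     d = next(k for k in range(3) if (i + k) % 3 and (j + k) % 3)
--     pa = [safe_idx(x, i + k) for k in range(d + 1)]
--     pb = [safe_idx(x, j + k) for k in range(d + 1)]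
--     if pa != pb:
--         return pa < pb
--     return ISA[i + d] < ISA[j + d]
-- ===== Notes on version B (the rewrite author's own statement) =====
-- stated objective: alternative
-- what changed: Replaces A's tail recursion with a closed-form step count d derived from the residues of i and j mod 3, then a single lexicographic comparison of the two (d+1)-element prefixes and one ISA lookup.
import Mathlib
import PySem

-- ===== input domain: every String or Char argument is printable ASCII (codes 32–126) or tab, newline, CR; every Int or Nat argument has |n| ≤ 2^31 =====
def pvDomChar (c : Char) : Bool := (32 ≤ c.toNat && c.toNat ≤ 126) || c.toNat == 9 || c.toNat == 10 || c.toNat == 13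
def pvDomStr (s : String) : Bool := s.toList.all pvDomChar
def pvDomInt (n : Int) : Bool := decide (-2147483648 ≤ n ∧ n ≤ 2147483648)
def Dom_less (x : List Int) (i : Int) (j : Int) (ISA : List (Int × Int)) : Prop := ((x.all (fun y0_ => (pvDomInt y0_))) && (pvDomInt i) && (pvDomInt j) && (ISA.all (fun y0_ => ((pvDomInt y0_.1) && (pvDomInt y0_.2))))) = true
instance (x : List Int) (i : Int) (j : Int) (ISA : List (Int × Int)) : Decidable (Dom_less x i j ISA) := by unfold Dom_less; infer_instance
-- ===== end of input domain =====

-- B replaces A's tail recursion by a closed-form step count d (from the residues of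
-- i and j mod 3) followed by one lexicographic comparison of the two (d+1)-element
-- prefixes and a single ISA lookup; objective: alternative decomposition, same cost.

-- ===== PORT A =====
-- safe_idx: SENTINEL if i >= len(x) else x[i].  Negative in-range i wraps like
-- Python; the out-of-range-negative IndexError case (excluded by Pre_) is modelled
-- by the default 0 of pyGetD (exact on Pre_).
def safeIdx (x : List Int) (i : Int) : Int :=
  if i ≥ (x.length : Int) then 0 else PySem.List.pyGetD x i 0

-- ISA[k]: first-match association-list lookup; the KeyError case (excluded by
-- Pre_) is modelled by the default 0 (exact on Pre_).
def isaGet (ISA : List (Int × Int)) (k : Int) : Int :=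
  (PySem.Dict.mk ISA).getD k 0

-- termination measure for A's recursion: the first k ∈ {0,1,2} with both
-- (i+k) % 3 ≠ 0 and (j+k) % 3 ≠ 0 (such k always exists)
def stepBound (i j : Int) : Nat :=
  if i % 3 ≠ 0 ∧ j % 3 ≠ 0 then 0
  else if (i + 1) % 3 ≠ 0 ∧ (j + 1) % 3 ≠ 0 then 1
  else 2

theorem stepBound_decr (i j : Int) (h : ¬ (i % 3 ≠ 0 ∧ j % 3 ≠ 0)) :
    stepBound (i + 1) (j + 1) < stepBound i j := by
  unfold stepBound
  split_ifs <;> omega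

def less (x : List Int) (i : Int) (j : Int) (ISA : List (Int × Int)) : Bool :=
  let a := safeIdx x i
  let b := safeIdx x j
  if a < b then true
  else if a > b then false
  else if i % 3 ≠ 0 ∧ j % 3 ≠ 0 then decide (isaGet ISA i < isaGet ISA j)
  else less x (i + 1) (j + 1) ISA
termination_by stepBound i j
decreasing_by exact stepBound_decr i j (by assumption)

-- ===== PORT B =====
-- Python list '<': lexicographic comparison
def pyListLt : List Int → List Int → Bool
  | [], [] => false
  | [], _ :: _ => true
  | _ :: _, [] => false
  | a :: as, b :: bs => if a < b then true else if b < a then false else pyListLt as bs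

-- next(k for k in range(3) if (i+k) % 3 and (j+k) % 3)
def firstStep (i j : Int) : Int :=
  (((PySem.List.pyRange 0 3 1).find?
      (fun k => (i + k) % 3 ≠ 0 ∧ (j + k) % 3 ≠ 0)).getD 2)

def less_alt (x : List Int) (i : Int) (j : Int) (ISA : List (Int × Int)) : Bool :=
  let d := firstStep i j
  let pa := (PySem.List.pyRange 0 (d + 1) 1).map (fun k => safeIdx x (i + k))
  let pb := (PySem.List.pyRange 0 (d + 1) 1).map (fun k => safeIdx x (j + k))
  if pa ≠ pb then pyListLt pa pb
  else decide (isaGet ISA (i + d) < isaGet ISA (j + d))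

-- ===== PRECONDITION & SPEC =====
-- Pre_ excludes exactly the inputs where the Python raises: an IndexError when
-- i or j is below -len(x), and a KeyError when the compared characters agree up
-- to the first sampled position i+d, j+d but ISA lacks one of those two keys.
def Pre_less (x : List Int) (i : Int) (j : Int) (ISA : List (Int × Int)) : Prop :=
  -(x.length : Int) ≤ i ∧ -(x.length : Int) ≤ j ∧
  ((∀ k : Nat, k ≤ stepBound i j → safeIdx x (i + k) = safeIdx x (j + k)) →
    ((PySem.Dict.mk ISA).contains (i + stepBound i j)
      ∧ (PySem.Dict.mk ISA).contains (j + stepBound i j)))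
instance (x : List Int) (i : Int) (j : Int) (ISA : List (Int × Int)) : Decidable (Pre_less x i j ISA) := by unfold Pre_less; infer_instance

def pvWitness_less : List Int × Int × Int × (List (Int × Int)) := ([1, 2, 3], 1, 2, [])

def Spec_less (x : List Int) (i : Int) (j : Int) (ISA : List (Int × Int)) (out : Bool) : Prop := out = less_alt x i j ISA
instance (x : List Int) (i : Int) (j : Int) (ISA : List (Int × Int)) (out : Bool) : Decidable (Spec_less x i j ISA out) := by unfold Spec_less; infer_instance

-- ===== CLAIM (what is proved, stated in full; the proofs are below) =====
def Claim_equal_less : Prop := ∀ (x : List Int) (i : Int) (j : Int) (ISA : List (Int × Int)), Dom_less x i j ISA → Pre_less x i j ISA → Spec_less x i j ISA (less x i j ISA)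

-- ===== LEMMAS AND PROOFS =====

theorem range3 : PySem.List.pyRange 0 3 1 = [0, 1, 2] := by decide
theorem range1' : PySem.List.pyRange 0 1 1 = [0] := by decide
theorem range2' : PySem.List.pyRange 0 2 1 = [0, 1] := by decide


theorem main_eq (x : List Int) (i j : Int) (ISA : List (Int × Int)) :
    less x i j ISA = less_alt x i j ISA := by
  by_cases c0 : (i % 3 ≠ 0 ∧ j % 3 ≠ 0)
  · have di : ¬ (3:Int) ∣ i := by omega
    have dj : ¬ (3:Int) ∣ j := by omega
    have hd : firstStep i j = 0 := by
      simp [firstStep, range3,  di, dj]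
    rw [less]
    by_cases h1 : safeIdx x i < safeIdx x j
    · simp [less_alt, hd,  range1', h1, pyListLt]; omega
    · by_cases h2 : safeIdx x j < safeIdx x i
      · simp [less_alt, hd,  range1', h1, h2, pyListLt]; omega
      · have he : safeIdx x i = safeIdx x j := by omega
        simp [less_alt, hd,  range1',   he,  di, dj]
  · by_cases c1 : ((i + 1) % 3 ≠ 0 ∧ (j + 1) % 3 ≠ 0)
    · have d0 : (3:Int) ∣ i ∨ (3:Int) ∣ j := by omega
      have di : ¬ (3:Int) ∣ (i + 1) := by omega
      have dj : ¬ (3:Int) ∣ (j + 1) := by omega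
      have hd : firstStep i j = 1 := by
        rcases d0 with h | h <;> simp [firstStep, range3, List.find?, h, di, dj]
      rw [less, less]
      by_cases h1 : safeIdx x i < safeIdx x j
      · simp [less_alt, hd,  range2', h1, pyListLt]; omega
      · by_cases h2 : safeIdx x j < safeIdx x i
        · rcases d0 with h | h <;> simp [less_alt, hd,  range2', h1, h2, pyListLt] <;> omega
        · have he : safeIdx x i = safeIdx x j := by omega
          by_cases h3 : safeIdx x (i + 1) < safeIdx x (j + 1)
          · rcases d0 with h | h <;> simp [less_alt, hd,  range2',  he, h3, pyListLt,  h] <;> omega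
          · by_cases h4 : safeIdx x (j + 1) < safeIdx x (i + 1)
            · rcases d0 with h | h <;> simp [less_alt, hd,  range2',  he, h3, h4, pyListLt,  h] <;> omega
            · have he2 : safeIdx x (i + 1) = safeIdx x (j + 1) := by omega
              rcases d0 with h | h <;> simp [less_alt, hd,  range2',   he, he2,  di, dj, h]
    · have d0 : (3:Int) ∣ i ∨ (3:Int) ∣ j := by omega
      have d1 : (3:Int) ∣ (i + 1) ∨ (3:Int) ∣ (j + 1) := by omega
      have di : ¬ (3:Int) ∣ (i + 2) := by omega
      have dj : ¬ (3:Int) ∣ (j + 2) := by omega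
      have hi2 : i + 1 + 1 = i + 2 := by ring
      have hj2 : j + 1 + 1 = j + 2 := by ring
      have hd : firstStep i j = 2 := by
        rcases d0 with h | h <;> rcases d1 with h' | h' <;>
          simp [firstStep, range3, List.find?, h, h', di, dj]
      rw [less, less, less]
      rw [hi2, hj2]
      by_cases h1 : safeIdx x i < safeIdx x j
      · simp [less_alt, hd,  range3, h1, pyListLt]; omega
      · by_cases h2 : safeIdx x j < safeIdx x i
        · rcases d0 with h | h <;> simp [less_alt, hd,  range3, h1, h2, pyListLt] <;> omega
        · have he : safeIdx x i = safeIdx x j := by omega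
          by_cases h3 : safeIdx x (i + 1) < safeIdx x (j + 1)
          · rcases d0 with h | h <;> rcases d1 with h' | h' <;>
              simp [less_alt, hd,  range3,  he, h3, pyListLt,  h] <;> omega
          · by_cases h4 : safeIdx x (j + 1) < safeIdx x (i + 1)
            · rcases d0 with h | h <;> rcases d1 with h' | h' <;>
                simp [less_alt, hd,  range3,  he, h3, h4, pyListLt,  h] <;> omega
            · have he2 : safeIdx x (i + 1) = safeIdx x (j + 1) := by omega
              by_cases h5 : safeIdx x (i + 2) < safeIdx x (j + 2)
              · rcases d0 with h | h <;> rcases d1 with h' | h' <;>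
                  simp [less_alt, hd,  range3,  he, he2, h5, pyListLt,  h, h'] <;> omega
              · by_cases h6 : safeIdx x (j + 2) < safeIdx x (i + 2)
                · rcases d0 with h | h <;> rcases d1 with h' | h' <;>
                    simp [less_alt, hd,  range3,  he, he2, h5, h6, pyListLt,  h, h'] <;> omega
                · have he3 : safeIdx x (i + 2) = safeIdx x (j + 2) := by omega
                  rcases d0 with h | h <;> rcases d1 with h' | h' <;>
                    simp [less_alt, hd,  range3,   he, he2, he3,  di, dj, h, h']

-- ===== VERDICT (by name: the statement is the Claim_ definition above) =====
theorem less_spec : Claim_equal_less := by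
  intro x i j ISA _ _
  unfold Spec_less
  exact main_eq x i j ISA
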